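-- pv_equiv track=rewrite | github.com/dana0221/2021Python | Teacher/2410_test.py | n_sum
-- ===== SOURCE A (Python) =====
-- def n_sum(n):
--     sum_value = 0
--     n_str = str(n)
--
--     if len(n_str) >= 10:
--         return -1
--     else:
--         for i in range(0, len(n_str)):
--             sum_value += i
--
--     return sum_value
-- ===== SOURCE B (Python) =====
-- def n_sum(n):
--     n_str = str(n)
--     L = len(n_str)
--     if L >= 10:
--         return -1
--     return L * (L - 1) // 2
-- ===== Notes on version B (the rewrite author's own statement) =====
-- stated objective: simpler
-- what changed: Replaces the index-accumulation loop with the closed-form triangular number L*(L-1)//2 of the string length.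
import Mathlib
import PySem

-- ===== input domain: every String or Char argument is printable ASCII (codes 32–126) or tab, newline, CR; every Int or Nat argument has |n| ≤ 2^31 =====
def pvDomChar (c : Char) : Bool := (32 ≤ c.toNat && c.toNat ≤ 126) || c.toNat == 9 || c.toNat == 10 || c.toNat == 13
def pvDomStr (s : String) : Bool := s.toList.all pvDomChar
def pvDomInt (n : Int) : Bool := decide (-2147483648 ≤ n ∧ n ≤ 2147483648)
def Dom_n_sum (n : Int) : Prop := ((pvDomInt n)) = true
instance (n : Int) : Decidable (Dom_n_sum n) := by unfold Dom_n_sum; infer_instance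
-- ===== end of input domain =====

-- B replaces A's index-summing loop by the closed-form triangular number of the string length (objective: simpler).
-- ===== PORT A =====
def n_sum (n : Int) : Int :=
  let nStr := PySem.Int.toStr n
  if PySem.Str.len nStr ≥ 10 then -1
  else (PySem.List.pyRange 0 (PySem.Str.len nStr) 1).foldl (fun acc i => acc + i) 0

-- ===== PORT B =====
def n_sum_alt (n : Int) : Int :=
  let L := PySem.Str.len (PySem.Int.toStr n)
  if L ≥ 10 then -1
  else PySem.Int.floordiv (L * (L - 1)) 2

-- ===== PRECONDITION & SPEC =====
def Spec_n_sum (n : Int) (out : Int) : Prop := out = n_sum_alt n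
instance (n : Int) (out : Int) : Decidable (Spec_n_sum n out) := by unfold Spec_n_sum; infer_instance

-- ===== CLAIM (what is proved, stated in full; the proofs are below) =====
def Claim_equal_n_sum : Prop := ∀ (n : Int), Dom_n_sum n → Spec_n_sum n (n_sum n)

-- ===== LEMMAS AND PROOFS =====

-- ===== VERDICT (by name: the statement is the Claim_ definition above) =====
-- sum of range(0, k) equals the triangular number, phrased with Python floor division
theorem sum_pyRange_tri (k : Nat) :
    (PySem.List.pyRange 0 (k : Int) 1).foldl (fun acc i => acc + i) 0
      = PySem.Int.floordiv ((k : Int) * ((k : Int) - 1)) 2 := by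
  induction k with
  | zero => decide
  | succ m ih =>
    have h : (0 : Int) ≤ (m : Int) := by positivity
    have hstep : ((m + 1 : Nat) : Int) = (m : Int) + 1 := by push_cast; ring
    rw [hstep, PySem.List.pyRange_one_succ_right h, List.foldl_append, ih]
    simp only [List.foldl]
    have h2 : ∃ t : Int, (m : Int) * ((m : Int) - 1) = 2 * t := by
      rcases Int.even_or_odd (m : Int) with ⟨t, ht⟩ | ⟨t, ht⟩
      · exact ⟨t * ((m : Int) - 1), by rw [ht]; ring⟩
      · exact ⟨(m : Int) * t, by rw [ht]; ring⟩
    rcases h2 with ⟨t, ht⟩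
    have ht' : ((m : Int) + 1) * ((m : Int) + 1 - 1) = 2 * (t + m) := by
      have : ((m : Int) + 1) * ((m : Int) + 1 - 1) = (m : Int) * ((m : Int) - 1) + 2 * (m : Int) := by ring
      rw [this, ht]; ring
    rw [ht, ht', PySem.Int.floordiv_eq_ediv_of_pos (by norm_num),
        PySem.Int.floordiv_eq_ediv_of_pos (by norm_num),
        Int.mul_ediv_cancel_left _ (by norm_num), Int.mul_ediv_cancel_left _ (by norm_num)]

theorem n_sum_spec : Claim_equal_n_sum := by
  intro n _
  unfold Spec_n_sum n_sum n_sum_alt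
  simp only []
  set L := PySem.Str.len (PySem.Int.toStr n) with hL
  by_cases h : L ≥ 10
  · simp [h]
  · simp only [if_neg h]
    have hLnn : 0 ≤ L := by rw [hL, PySem.Str.len_eq]; positivity
    obtain ⟨k, hk⟩ := Int.eq_ofNat_of_zero_le hLnn
    rw [hk]
    exact sum_pyRange_tri k
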